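-- pv_equiv track=rewrite | github.com/mohammad59mt/active_link_monitoring | PSO.py | routingMatrix_from_nodeBasePath
-- ===== SOURCE A (Python) =====
-- def routingMatrix_from_nodeBasePath(node_based_path_array):
--     map_switch_to_MAC, map_MAC_to_switch, number_of_switches = {}, {}, 0
--     number_of_probes = len(node_based_path_array)
--     ''' find the all switches'''
--     for path in node_based_path_array:
--         for i in range(len(path)):
--             if not path[i] in map_MAC_to_switch:
--                 map_MAC_to_switch[path[i]] = number_of_switches
--                 map_switch_to_MAC[number_of_switches] = path[i]
--                 number_of_switches += 1
--     routing_matrix =  [[[0 for f in range(number_of_probes)] for j in range(number_of_switches)] for i in range(number_of_switches)]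
--     tmp_f = 0
--     for path in node_based_path_array:
--         for i in range(len(path)-1):
--             i, j = map_MAC_to_switch[path[i]], map_MAC_to_switch[path[i+1]]
--             routing_matrix[i][j][tmp_f] = 1
--         tmp_f += 1
--     return routing_matrix, map_switch_to_MAC
-- ===== SOURCE B (Python) =====
-- def routingMatrix_from_nodeBasePath(node_based_path_array):
--     # first-seen numbering of switches (same discovery order as the original)
--     idx = {}
--     for path in node_based_path_array:
--         for mac in path:
--             if mac not in idx:
--                 idx[mac] = len(idx)
--     n = len(idx)
--     F = len(node_based_path_array)
--     # collect the set of (src, dst, probe) edges, then build the matrix by membership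
--     edges = set()
--     for f, path in enumerate(node_based_path_array):
--         for u, v in zip(path, path[1:]):
--             edges.add((idx[u], idx[v], f))
--     routing_matrix = [[[1 if (i, j, f) in edges else 0 for f in range(F)]
--                        for j in range(n)] for i in range(n)]
--     map_switch_to_MAC = {s: mac for mac, s in idx.items()}
--     return routing_matrix, map_switch_to_MAC
-- ===== Notes on version B (the rewrite author's own statement) =====
-- stated objective: alternative
-- what changed: Instead of allocating a zero matrix and mutating cells in place per consecutive path pair, B collects an edge set {(idx[u], idx[v], probe)} in one enumerate/zip pass and then builds the whole matrix functionally by membership test; the reverse map is derived by swapping the index dict's items rather than maintained in parallel.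
import Mathlib
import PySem

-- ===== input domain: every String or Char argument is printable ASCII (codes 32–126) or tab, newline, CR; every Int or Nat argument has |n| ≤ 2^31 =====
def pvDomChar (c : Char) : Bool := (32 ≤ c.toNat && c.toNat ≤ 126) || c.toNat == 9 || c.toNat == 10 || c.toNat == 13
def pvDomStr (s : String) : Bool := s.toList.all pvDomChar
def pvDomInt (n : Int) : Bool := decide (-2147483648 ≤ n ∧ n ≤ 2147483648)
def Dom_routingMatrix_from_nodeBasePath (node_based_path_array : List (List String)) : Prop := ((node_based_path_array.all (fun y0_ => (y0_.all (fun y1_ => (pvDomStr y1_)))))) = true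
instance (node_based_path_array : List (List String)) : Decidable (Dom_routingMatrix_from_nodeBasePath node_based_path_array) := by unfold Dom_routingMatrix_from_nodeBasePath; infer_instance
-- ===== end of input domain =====

-- B replaces the mutate-a-zero-matrix second phase by an edge-set + membership comprehension and derives
-- the switch→MAC map by swapping the index dict, instead of maintaining two dicts and mutating cells (objective: alternative).

-- ===== PORT A =====
-- routing_matrix[i][j][f] = 1 (three-level list assignment); exact here: the indices produced are ≥ 0 and in range
def pvSet3 (m : List (List (List Int))) (i j f : Int) : List (List (List Int)) :=
  m.modify i.toNat (fun row => row.modify j.toNat (fun cell => cell.set f.toNat 1))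

def routingMatrix_from_nodeBasePath (node_based_path_array : List (List String)) :
    List (List (List Int)) × (List (Int × String)) :=
  -- pass 1: find all switches (map_switch_to_MAC, map_MAC_to_switch, number_of_switches)
  let st := node_based_path_array.foldl (fun st path =>
      (PySem.List.pyRange 0 (path.length : Int) 1).foldl
        (fun (st : PySem.Dict Int String × PySem.Dict String Int × Int) i =>
          if st.2.1.contains (PySem.List.pyGetD path i "") then st
          else (st.1.insert st.2.2 (PySem.List.pyGetD path i ""),
                st.2.1.insert (PySem.List.pyGetD path i "") st.2.2,
                st.2.2 + 1)) st)
    (PySem.Dict.empty, PySem.Dict.empty, 0)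
  let map_switch_to_MAC := st.1
  let map_MAC_to_switch := st.2.1
  let number_of_switches := st.2.2
  let number_of_probes : Int := node_based_path_array.length
  let routing_matrix :=
    (PySem.List.pyRange 0 number_of_switches 1).map (fun _i =>
      (PySem.List.pyRange 0 number_of_switches 1).map (fun _j =>
        (PySem.List.pyRange 0 number_of_probes 1).map (fun _f => (0 : Int))))
  -- pass 2: set cells; map_MAC_to_switch[path[i]] ported as getD _ 0 — exact: every key is present (pass 1)
  let st2 := node_based_path_array.foldl
      (fun (st2 : List (List (List Int)) × Int) path =>
        ((PySem.List.pyRange 0 ((path.length : Int) - 1) 1).foldl (fun m i =>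
            pvSet3 m (map_MAC_to_switch.getD (PySem.List.pyGetD path i "") 0)
                     (map_MAC_to_switch.getD (PySem.List.pyGetD path (i + 1) "") 0) st2.2) st2.1,
         st2.2 + 1))
      (routing_matrix, 0)
  (st2.1, map_switch_to_MAC.items)

-- ===== PORT B =====
def routingMatrix_from_nodeBasePath_alt (node_based_path_array : List (List String)) :
    List (List (List Int)) × (List (Int × String)) :=
  let idx : PySem.Dict String Int := node_based_path_array.foldl (fun d path =>
      path.foldl (fun d mac => if d.contains mac then d else d.insert mac (d.size : Int)) d)
    PySem.Dict.empty
  let n : Int := idx.size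
  let F : Int := node_based_path_array.length
  -- idx[u] ported as getD _ 0 — exact: every key is present (first loop)
  let edges : PySem.Set (Int × Int × Int) :=
    (PySem.List.enumerate node_based_path_array 0).foldl (fun es fp =>
      (fp.2.zip (PySem.List.slice fp.2 (some 1) none)).foldl (fun es uv =>
        PySem.Set.add es (idx.getD uv.1 0, idx.getD uv.2 0, fp.1)) es) PySem.Set.empty
  let routing_matrix :=
    (PySem.List.pyRange 0 n 1).map (fun i =>
      (PySem.List.pyRange 0 n 1).map (fun j =>
        (PySem.List.pyRange 0 F 1).map (fun f =>
          if PySem.Set.contains edges (i, j, f) then (1 : Int) else 0)))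
  -- the dict comprehension {s: mac for mac, s in idx.items()} as the loop it is
  let map_switch_to_MAC :=
    idx.items.foldl (fun d p => d.insert p.2 p.1) (PySem.Dict.empty : PySem.Dict Int String)
  (routing_matrix, map_switch_to_MAC.items)

-- ===== PRECONDITION & SPEC =====
def Spec_routingMatrix_from_nodeBasePath (node_based_path_array : List (List String)) (out : List (List (List Int)) × (List (Int × String))) : Prop := out = routingMatrix_from_nodeBasePath_alt node_based_path_array
instance (node_based_path_array : List (List String)) (out : List (List (List Int)) × (List (Int × String))) : Decidable (Spec_routingMatrix_from_nodeBasePath node_based_path_array out) := by unfold Spec_routingMatrix_from_nodeBasePath; infer_instance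

-- ===== CLAIM (what is proved, stated in full; the proofs are below) =====
def Claim_equal_routingMatrix_from_nodeBasePath : Prop := ∀ (node_based_path_array : List (List String)), Dom_routingMatrix_from_nodeBasePath node_based_path_array → Spec_routingMatrix_from_nodeBasePath node_based_path_array (routingMatrix_from_nodeBasePath node_based_path_array)

-- ===== LEMMAS AND PROOFS =====

-- ---- generic list-cell lemmas ----
theorem pv_getD_set {α : Type} (l : List α) (i j : Nat) (a d : α) :
    (l.set i a).getD j d = if i = j ∧ j < l.length then a else l.getD j d := by
  by_cases h : j < l.length
  · rw [List.getD_eq_getElem _ _ (by simpa using h), List.getElem_set]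
    by_cases hij : i = j
    · simp [hij, h]
    · rw [if_neg hij, if_neg (by tauto), List.getD_eq_getElem _ _ h]
  · rw [List.getD_eq_default _ _ (by simpa using Nat.le_of_not_lt h),
        List.getD_eq_default _ _ (Nat.le_of_not_lt h)]
    simp [h]

theorem pv_getD_modify {α : Type} (l : List α) (i j : Nat) (f : α → α) (d : α) :
    (l.modify i f).getD j d = if i = j ∧ j < l.length then f (l.getD j d) else l.getD j d := by
  by_cases h : j < l.length
  · rw [List.getD_eq_getElem _ _ (by simpa using h), List.getElem_modify]
    by_cases hij : i = j
    · simp [hij, h, List.getD_eq_getElem _ _ h]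
    · rw [if_neg hij, if_neg (by tauto), List.getD_eq_getElem _ _ h]
  · rw [List.getD_eq_default _ _ (by simpa using Nat.le_of_not_lt h),
        List.getD_eq_default _ _ (Nat.le_of_not_lt h)]
    simp [h]

theorem pv_getD_replicate {α : Type} (n j : Nat) (x d : α) :
    (List.replicate n x).getD j d = if j < n then x else d := by
  by_cases h : j < n
  · rw [List.getD_eq_getElem _ _ (by simpa using h)]; simp [h]
  · rw [List.getD_eq_default _ _ (by simpa using Nat.le_of_not_lt h)]; simp [h]

-- ---- matrix shape and cell getter ----
def pvGet3 (m : List (List (List Int))) (a b c : Nat) : Int :=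
  ((m.getD a []).getD b []).getD c 0

def pvShape (m : List (List (List Int))) (n F : Nat) : Prop :=
  m.length = n ∧ ∀ a, a < n → (m.getD a []).length = n ∧
    ∀ b, b < n → ((m.getD a []).getD b []).length = F

theorem pvShape_pvSet3 {m : List (List (List Int))} {n F : Nat} (hs : pvShape m n F)
    (i j f : Int) : pvShape (pvSet3 m i j f) n F := by
  obtain ⟨h1, h2⟩ := hs
  refine ⟨by simp [pvSet3, h1], ?_⟩
  intro a ha
  simp only [pvSet3, pv_getD_modify]
  split_ifs with hrow
  · refine ⟨by simpa using (h2 a ha).1, ?_⟩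
    intro b hb
    rw [pv_getD_modify]
    split_ifs with hcell
    · simpa using (h2 a ha).2 b hb
    · exact (h2 a ha).2 b hb
  · exact h2 a ha

theorem pvGet3_pvSet3 {m : List (List (List Int))} {n F : Nat} (hs : pvShape m n F)
    {i j f : Int} (hi : 0 ≤ i) (hj : 0 ≤ j) (hf : 0 ≤ f)
    {a b c : Nat} (ha : a < n) (hb : b < n) (hc : c < F) :
    pvGet3 (pvSet3 m i j f) a b c =
      if (a : Int) = i ∧ (b : Int) = j ∧ (c : Int) = f then 1 else pvGet3 m a b c := by
  obtain ⟨h1, h2⟩ := hs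
  have hrow : (m.getD a []).length = n := (h2 a ha).1
  have hcell : ((m.getD a []).getD b []).length = F := (h2 a ha).2 b hb
  have hia : (i.toNat = a) ↔ ((a : Int) = i) := by omega
  have hjb : (j.toNat = b) ↔ ((b : Int) = j) := by omega
  have hfc : (f.toNat = c) ↔ ((c : Int) = f) := by omega
  simp only [pvGet3, pvSet3]
  rw [pv_getD_modify]
  by_cases hA : i.toNat = a
  · rw [if_pos ⟨hA, by omega⟩, pv_getD_modify]
    by_cases hB : j.toNat = b
    · rw [if_pos ⟨hB, by omega⟩, pv_getD_set]
      by_cases hC : f.toNat = c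
      · rw [if_pos ⟨hC, by omega⟩, if_pos ⟨hia.mp hA, hjb.mp hB, hfc.mp hC⟩]
      · rw [if_neg (by tauto), if_neg (fun h => hC (hfc.mpr h.2.2))]
    · rw [if_neg (by tauto), if_neg (fun h => hB (hjb.mpr h.2.1))]
  · rw [if_neg (by tauto), if_neg (fun h => hA (hia.mpr h.1))]

theorem pvShape_foldl {n F : Nat} (ts : List (Int × Int × Int)) :
    ∀ m, pvShape m n F →
      pvShape (ts.foldl (fun m t => pvSet3 m t.1 t.2.1 t.2.2) m) n F := by
  induction ts with
  | nil => intro m hm; simpa using hm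
  | cons t ts ih =>
      intro m hm
      simpa using ih _ (pvShape_pvSet3 hm t.1 t.2.1 t.2.2)

theorem pvGet3_foldl {n F : Nat} (ts : List (Int × Int × Int)) :
    ∀ m, pvShape m n F → (∀ t ∈ ts, 0 ≤ t.1 ∧ 0 ≤ t.2.1 ∧ 0 ≤ t.2.2) →
    ∀ a b c : Nat, a < n → b < n → c < F →
    pvGet3 (ts.foldl (fun m t => pvSet3 m t.1 t.2.1 t.2.2) m) a b c =
      if ((a : Int), (b : Int), (c : Int)) ∈ ts then 1 else pvGet3 m a b c := by
  induction ts with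
  | nil => intro m hm _ a b c ha hb hc; simp
  | cons t ts ih =>
      obtain ⟨t1, t2, t3⟩ := t
      intro m hm hts a b c ha hb hc
      have ht := hts (t1, t2, t3) (by simp)
      rw [List.foldl_cons,
          ih _ (pvShape_pvSet3 hm t1 t2 t3) (fun u hu => hts u (by simp [hu])) a b c ha hb hc,
          pvGet3_pvSet3 hm ht.1 ht.2.1 ht.2.2 ha hb hc]
      by_cases hmem : ((a : Int), (b : Int), (c : Int)) ∈ ts
      · simp [hmem]
      · by_cases heq : (a : Int) = t1 ∧ (b : Int) = t2 ∧ (c : Int) = t3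
        · simp [hmem, heq, Prod.ext_iff]
        · have : ¬ ((a : Int), (b : Int), (c : Int)) = (t1, t2, t3) := by
            simpa [Prod.ext_iff] using heq
          simp [hmem, heq, this]

-- ---- pass 1: both discovery loops build the same numbering ----
def pvStepB (d : PySem.Dict String Int) (mac : String) : PySem.Dict String Int :=
  if d.contains mac then d else d.insert mac (d.size : Int)

def pvStepA (st : PySem.Dict Int String × PySem.Dict String Int × Int) (mac : String) :
    PySem.Dict Int String × PySem.Dict String Int × Int :=
  if st.2.1.contains mac then st
  else (st.1.insert st.2.2 mac, st.2.1.insert mac st.2.2, st.2.2 + 1)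

def pvGood (d : PySem.Dict String Int) : Prop :=
  d.keys.Nodup ∧ d.values = (List.range d.size).map (fun k : Nat => (k : Int))

def pvRel (st : PySem.Dict Int String × PySem.Dict String Int × Int)
    (d : PySem.Dict String Int) : Prop :=
  st.2.1 = d ∧ st.2.2 = (d.size : Int) ∧
    st.1.items = d.items.map (fun p => (p.2, p.1))

theorem pv_mem_range_cast {nn : Nat} {v : Int}
    (h : v ∈ (List.range nn).map (fun k : Nat => (k : Int))) : 0 ≤ v ∧ v < (nn : Int) := by
  rcases List.mem_map.mp h with ⟨k, hk, rfl⟩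
  rw [List.mem_range] at hk
  omega

theorem pv_step (st : PySem.Dict Int String × PySem.Dict String Int × Int)
    (d : PySem.Dict String Int) (mac : String) (hg : pvGood d) (hr : pvRel st d) :
    pvGood (pvStepB d mac) ∧ pvRel (pvStepA st mac) (pvStepB d mac) := by
  obtain ⟨hnd, hv⟩ := hg
  obtain ⟨h1, h2, h3⟩ := hr
  by_cases h : d.contains mac = true
  · simp only [pvStepB, pvStepA, h1, h, if_true]
    exact ⟨⟨hnd, hv⟩, h1, h2, h3⟩
  · have hfalse : d.contains mac = false := by simpa using h
    simp only [pvStepB, pvStepA, h1, hfalse, Bool.false_eq_true, if_false]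
    have hitems := PySem.Dict.items_insert_of_not_contains d ((d.size : Int)) hfalse
    have hsize : (d.insert mac (d.size : Int)).size = d.size + 1 := by
      rw [PySem.Dict.size_insert]; simp [hfalse]
    have hvals : (d.insert mac (d.size : Int)).values = d.values ++ [(d.size : Int)] := by
      simp only [PySem.Dict.values, hitems, List.map_append, List.map_cons, List.map_nil]
    have hst1 : st.1.contains st.2.2 = false := by
      have hkeys : st.1.keys = d.values := by
        simp only [PySem.Dict.keys, PySem.Dict.values, h3, List.map_map]
        rfl
      rw [PySem.Dict.contains_eq_decide_mem_keys, hkeys, hv, h2,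
          decide_eq_false_iff_not]
      intro hmem
      have := pv_mem_range_cast hmem
      omega
    refine ⟨⟨PySem.Dict.nodup_keys_insert d mac _ hnd, ?_⟩, ?_, ?_, ?_⟩
    · rw [hvals, hsize, hv, List.range_succ]
      simp
    · rw [h2]
    · rw [hsize, h2]; push_cast; ring
    · rw [PySem.Dict.items_insert_of_not_contains st.1 mac hst1, h3, hitems, h2]
      simp

theorem pv_pass1_path (path : List String) :
    ∀ st d, pvGood d → pvRel st d →
    pvGood (path.foldl pvStepB d) ∧ pvRel (path.foldl pvStepA st) (path.foldl pvStepB d) := by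
  induction path with
  | nil => intro st d hg hr; exact ⟨hg, hr⟩
  | cons mac path ih =>
      intro st d hg hr
      have h := pv_step st d mac hg hr
      simpa using ih _ _ h.1 h.2

theorem pv_pass1 (arr : List (List String)) :
    ∀ st d, pvGood d → pvRel st d →
    pvGood (arr.foldl (fun d path => path.foldl pvStepB d) d) ∧
    pvRel (arr.foldl (fun st path => path.foldl pvStepA st) st)
          (arr.foldl (fun d path => path.foldl pvStepB d) d) := by
  induction arr with
  | nil => intro st d hg hr; exact ⟨hg, hr⟩
  | cons path arr ih =>
      intro st d hg hr
      have h := pv_pass1_path path st d hg hr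
      simpa using ih _ _ h.1 h.2

theorem pv_good_empty : pvGood (PySem.Dict.empty : PySem.Dict String Int) := by
  constructor <;> simp [PySem.Dict.keys, PySem.Dict.values, PySem.Dict.size, PySem.Dict.empty]

theorem pv_rel_empty :
    pvRel (PySem.Dict.empty, PySem.Dict.empty, 0) (PySem.Dict.empty : PySem.Dict String Int) := by
  refine ⟨rfl, ?_, ?_⟩ <;>
    simp [PySem.Dict.items, PySem.Dict.size, PySem.Dict.empty]

theorem pv_getD_nonneg (d : PySem.Dict String Int) (hg : pvGood d) (k : String) :
    0 ≤ d.getD k 0 := by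
  cases h : d.get? k with
  | none => rw [PySem.Dict.getD_of_get?_eq_none d _ h]
  | some v =>
      rw [PySem.Dict.getD_of_get?_eq_some d _ h]
      have hmem := PySem.Dict.mem_items_of_get?_eq_some d h
      have hval : v ∈ d.values := by
        simp only [PySem.Dict.values, List.mem_map]
        exact ⟨(k, v), hmem, rfl⟩
      rw [hg.2] at hval
      exact (pv_mem_range_cast hval).1

theorem pv_enum_fst_le {α : Type} (xs : List α) :
    ∀ (s : Int) (fp : Int × α), fp ∈ PySem.List.enumerate xs s → s ≤ fp.1 := by
  induction xs with
  | nil => intro s fp h; simp [PySem.List.enumerate] at h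
  | cons x xs ih =>
      intro s fp h
      rw [PySem.List.enumerate_cons] at h
      rcases List.mem_cons.mp h with h | h
      · rw [h]
      · have := ih (s + 1) fp h; omega

-- ---- fold restructurings ----
theorem pv_foldl_enum {α β : Type} (g : β → Int → α → β) :
    ∀ (l : List α) (b : β) (s : Int),
    (l.foldl (fun (p : β × Int) x => (g p.1 p.2 x, p.2 + 1)) (b, s)).1
      = (PySem.List.enumerate l s).foldl (fun b fx => g b fx.1 fx.2) b := by
  intro l
  induction l with
  | nil => intro b s; simp [PySem.List.enumerate]
  | cons x l ih =>
      intro b s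
      rw [PySem.List.enumerate_cons]
      simpa using ih (g b s x) (s + 1)

theorem pv_foldl_flat {α β γ : Type} (g : β → γ → β) (h : α → List γ) :
    ∀ (l : List α) (b : β),
    l.foldl (fun b x => (h x).foldl g b) b = (l.flatMap h).foldl g b := by
  intro l
  induction l with
  | nil => intro b; simp
  | cons x l ih => intro b; simp [List.flatMap_cons, List.foldl_append, ih]

theorem pv_foldl_pairs {β : Type} (g : β → String → String → β) :
    ∀ (xs : List String) (b : β),
    (List.range (xs.length - 1)).foldl
        (fun m k => g m (xs.getD k "") (xs.getD (k + 1) "")) b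
      = (xs.zip xs.tail).foldl (fun m uv => g m uv.1 uv.2) b := by
  intro xs
  induction xs with
  | nil => intro b; simp
  | cons u xs ih =>
      cases xs with
      | nil => intro b; simp
      | cons v tl =>
          intro b
          have hlen : (u :: v :: tl).length - 1 = tl.length + 1 := by simp
          rw [hlen, List.range_succ_eq_map, List.foldl_cons, List.foldl_map]
          simp only [Nat.succ_eq_add_one, List.getD_cons_succ, List.getD_cons_zero]
          have := ih (g b u v)
          simp only [List.length_cons, Nat.add_sub_cancel, List.tail_cons,
            List.getD_cons_succ, List.getD_cons_zero, Nat.succ_eq_add_one] at this ⊢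
          rw [this]
          simp [List.zip_cons_cons]

-- ---- canonical forms of the two ports ----
def pvIdx (arr : List (List String)) : PySem.Dict String Int :=
  arr.foldl (fun d path => path.foldl pvStepB d) PySem.Dict.empty

def pvStA (arr : List (List String)) : PySem.Dict Int String × PySem.Dict String Int × Int :=
  arr.foldl (fun st path => path.foldl pvStepA st) (PySem.Dict.empty, PySem.Dict.empty, 0)

def pvTrips (d : PySem.Dict String Int) (arr : List (List String)) : List (Int × Int × Int) :=
  (PySem.List.enumerate arr 0).flatMap (fun fp =>
    (fp.2.zip fp.2.tail).map (fun uv => (d.getD uv.1 0, d.getD uv.2 0, fp.1)))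

def pvZeroI (ns nf : Int) : List (List (List Int)) :=
  (PySem.List.pyRange 0 ns 1).map (fun _ =>
    (PySem.List.pyRange 0 ns 1).map (fun _ =>
      (PySem.List.pyRange 0 nf 1).map (fun _ => (0 : Int))))

theorem pv_pass1_main (arr : List (List String)) :
    pvGood (pvIdx arr) ∧ pvRel (pvStA arr) (pvIdx arr) :=
  pv_pass1 arr _ _ pv_good_empty pv_rel_empty

-- A's port in canonical form
theorem pv_portA_eq (arr : List (List String)) :
    routingMatrix_from_nodeBasePath arr =
      ((pvTrips (pvStA arr).2.1 arr).foldl (fun m t => pvSet3 m t.1 t.2.1 t.2.2)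
          (pvZeroI (pvStA arr).2.2 (arr.length : Int)),
       (pvStA arr).1.items) := by
  unfold routingMatrix_from_nodeBasePath
  have h1 : (fun (st : PySem.Dict Int String × PySem.Dict String Int × Int) (path : List String) =>
      (PySem.List.pyRange 0 (path.length : Int) 1).foldl
        (fun (st : PySem.Dict Int String × PySem.Dict String Int × Int) i =>
          if st.2.1.contains (PySem.List.pyGetD path i "") then st
          else (st.1.insert st.2.2 (PySem.List.pyGetD path i ""),
                st.2.1.insert (PySem.List.pyGetD path i "") st.2.2,
                st.2.2 + 1)) st)
      = (fun st path => path.foldl pvStepA st) := by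
    funext st path
    exact PySem.List.foldl_pyRange_zero_pyGetD' path ""
      (fun st x => if st.2.1.contains x then st
        else (st.1.insert st.2.2 x, st.2.1.insert x st.2.2, st.2.2 + 1)) st
  rw [h1]
  simp only []
  have h2 : ∀ (D : PySem.Dict String Int) (z : List (List (List Int))),
      (arr.foldl (fun (st2 : List (List (List Int)) × Int) path =>
        ((PySem.List.pyRange 0 ((path.length : Int) - 1) 1).foldl (fun m i =>
            pvSet3 m (D.getD (PySem.List.pyGetD path i "") 0)
                     (D.getD (PySem.List.pyGetD path (i + 1) "") 0) st2.2) st2.1,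
         st2.2 + 1)) (z, 0)).1
      = (pvTrips D arr).foldl (fun m t => pvSet3 m t.1 t.2.1 t.2.2) z := by
    intro D z
    rw [pv_foldl_enum (fun m f path =>
      (PySem.List.pyRange 0 ((path.length : Int) - 1) 1).foldl (fun m i =>
        pvSet3 m (D.getD (PySem.List.pyGetD path i "") 0)
                 (D.getD (PySem.List.pyGetD path (i + 1) "") 0) f) m) arr z 0]
    rw [pvTrips, ← pv_foldl_flat]
    have hin : ∀ (f : Int) (path : List String) (m : List (List (List Int))),
        (PySem.List.pyRange 0 ((path.length : Int) - 1) 1).foldl (fun m i =>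
            pvSet3 m (D.getD (PySem.List.pyGetD path i "") 0)
                     (D.getD (PySem.List.pyGetD path (i + 1) "") 0) f) m
        = ((path.zip path.tail).map
              (fun uv => (D.getD uv.1 0, D.getD uv.2 0, f))).foldl
            (fun m t => pvSet3 m t.1 t.2.1 t.2.2) m := by
      intro f path m
      rw [PySem.List.pyRange_one]
      have hn : (((path.length : Int) - 1) - 0).toNat = path.length - 1 := by omega
      rw [hn, List.foldl_map]
      have hcast : ∀ k : Nat, ((k : Int) + 1) = (((k + 1 : Nat)) : Int) := by
        intro k; push_cast; ring
      simp only [zero_add]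
      simp only [hcast, PySem.List.pyGetD_natCast]
      rw [pv_foldl_pairs (fun m u v => pvSet3 m (D.getD u 0) (D.getD v 0) f), List.foldl_map]
    congr 1
    funext m fp
    exact hin fp.1 fp.2 m
  rw [h2]
  rfl
-- B's port in canonical form
theorem pv_portB_eq (arr : List (List String)) :
    routingMatrix_from_nodeBasePath_alt arr =
      ((PySem.List.pyRange 0 ((pvIdx arr).size : Int) 1).map (fun i =>
        (PySem.List.pyRange 0 ((pvIdx arr).size : Int) 1).map (fun j =>
          (PySem.List.pyRange 0 (arr.length : Int) 1).map (fun f =>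
            if PySem.Set.contains (PySem.Set.ofList (pvTrips (pvIdx arr) arr)) (i, j, f)
            then (1 : Int) else 0))),
       ((pvIdx arr).items.foldl (fun d p => d.insert p.2 p.1)
          (PySem.Dict.empty : PySem.Dict Int String)).items) := by
  unfold routingMatrix_from_nodeBasePath_alt
  simp only []
  have hidx : arr.foldl (fun d path => path.foldl
      (fun d mac => if d.contains mac then d else d.insert mac (d.size : Int)) d)
      PySem.Dict.empty = pvIdx arr := rfl
  rw [hidx]
  have hedges : (PySem.List.enumerate arr 0).foldl (fun es fp =>
      (fp.2.zip (PySem.List.slice fp.2 (some 1) none)).foldl (fun es uv =>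
        PySem.Set.add es ((pvIdx arr).getD uv.1 0, (pvIdx arr).getD uv.2 0, fp.1)) es)
      PySem.Set.empty
      = PySem.Set.ofList (pvTrips (pvIdx arr) arr) := by
    rw [pvTrips, PySem.Set.ofList_eq_foldl, ← pv_foldl_flat]
    congr 1
    funext es fp
    rw [PySem.List.slice_from_one, List.foldl_map]
  rw [hedges]

-- a shaped matrix is the table of its entries
theorem pv_matrix_ext (m : List (List (List Int))) (n F : Nat) (hs : pvShape m n F) :
    m = (List.range n).map (fun a => (List.range n).map (fun b =>
          (List.range F).map (fun c => pvGet3 m a b c))) := by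
  obtain ⟨h1, h2⟩ := hs
  apply List.ext_getElem (by simp [h1])
  intro a ha ha'
  have han : a < n := by simpa [h1] using ha
  have hga : m.getD a [] = m[a] := List.getD_eq_getElem m [] ha
  simp only [List.getElem_map, List.getElem_range]
  apply List.ext_getElem (by rw [← hga]; simpa using (h2 a han).1)
  intro b hb hb'
  have hbn : b < n := by simpa using hb'
  have hgb : (m.getD a []).getD b [] = m[a][b] := by
    rw [hga]; exact List.getD_eq_getElem m[a] [] hb
  simp only [List.getElem_map, List.getElem_range]
  apply List.ext_getElem (by rw [← hgb]; simpa using (h2 a han).2 b hbn)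
  intro c hc hc'
  have hcF : c < F := by simpa using hc'
  simp only [List.getElem_map, List.getElem_range, pvGet3]
  rw [hgb, List.getD_eq_getElem m[a][b] 0 hc]

-- the two matrices agree
theorem pv_matrix_eq (arr : List (List String)) :
    (pvTrips (pvIdx arr) arr).foldl (fun m t => pvSet3 m t.1 t.2.1 t.2.2)
        (pvZeroI ((pvIdx arr).size : Int) (arr.length : Int))
      = (PySem.List.pyRange 0 ((pvIdx arr).size : Int) 1).map (fun i =>
          (PySem.List.pyRange 0 ((pvIdx arr).size : Int) 1).map (fun j =>
            (PySem.List.pyRange 0 (arr.length : Int) 1).map (fun f =>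
              if PySem.Set.contains (PySem.Set.ofList (pvTrips (pvIdx arr) arr)) (i, j, f)
              then (1 : Int) else 0))) := by
  have hgood := (pv_pass1_main arr).1
  set d := pvIdx arr with hd
  set ts := pvTrips d arr with hts
  set n := d.size with hn
  set F := arr.length with hF
  have hzero : pvZeroI (n : Int) (F : Int)
      = List.replicate n (List.replicate n (List.replicate F (0 : Int))) := by
    simp [pvZeroI, PySem.List.pyRange_zero_natCast, List.map_map, Function.comp_def,
      List.map_const']
  have hzshape : pvShape (List.replicate n (List.replicate n (List.replicate F (0 : Int)))) n F := by
    refine ⟨by simp, ?_⟩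
    intro a ha
    rw [pv_getD_replicate, if_pos ha]
    exact ⟨by simp, fun b hb => by rw [pv_getD_replicate, if_pos hb]; simp⟩
  have hzget : ∀ a b c : Nat,
      pvGet3 (List.replicate n (List.replicate n (List.replicate F (0 : Int)))) a b c = 0 := by
    intro a b c
    simp only [pvGet3]
    rw [pv_getD_replicate]
    by_cases ha : a < n
    · rw [if_pos ha, pv_getD_replicate]
      by_cases hb : b < n
      · rw [if_pos hb, pv_getD_replicate]
        by_cases hcq : c < F
        · rw [if_pos hcq]
        · rw [if_neg hcq]
      · rw [if_neg hb]; simp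
    · rw [if_neg ha]; simp
  have hnonneg : ∀ t ∈ ts, 0 ≤ t.1 ∧ 0 ≤ t.2.1 ∧ 0 ≤ t.2.2 := by
    intro t ht
    rw [hts, pvTrips] at ht
    obtain ⟨fp, hfp, hmem⟩ := List.mem_flatMap.mp ht
    obtain ⟨uv, _, rfl⟩ := List.mem_map.mp hmem
    exact ⟨pv_getD_nonneg d hgood uv.1, pv_getD_nonneg d hgood uv.2,
      pv_enum_fst_le arr 0 fp hfp⟩
  have hshape : pvShape (ts.foldl (fun m t => pvSet3 m t.1 t.2.1 t.2.2)
      (List.replicate n (List.replicate n (List.replicate F (0 : Int))))) n F :=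
    pvShape_foldl ts _ hzshape
  rw [hzero, pv_matrix_ext _ n F hshape]
  -- right side into range form
  simp only [PySem.List.pyRange_zero_natCast, List.map_map]
  apply List.map_congr_left
  intro a haa
  rw [List.mem_range] at haa
  simp only [Function.comp]
  apply List.map_congr_left
  intro b hbb
  rw [List.mem_range] at hbb
  apply List.map_congr_left
  intro c hcc
  rw [List.mem_range] at hcc
  rw [pvGet3_foldl ts _ hzshape hnonneg a b c haa hbb hcc, hzget]
  have hcb : (PySem.Set.contains (PySem.Set.ofList ts) ((a : Int), (b : Int), (c : Int)) = true)
      ↔ ((a : Int), (b : Int), (c : Int)) ∈ ts := by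
    unfold PySem.Set.contains
    exact List.contains_iff_mem.trans (PySem.Set.mem_ofList ts _)
  by_cases hm : ((a : Int), (b : Int), (c : Int)) ∈ ts
  · rw [if_pos hm]
    show (1 : Int) = if PySem.Set.contains (PySem.Set.ofList ts)
        ((a : Int), (b : Int), (c : Int)) = true then (1 : Int) else 0
    rw [if_pos (hcb.mpr hm)]
  · rw [if_neg hm]
    show (0 : Int) = if PySem.Set.contains (PySem.Set.ofList ts)
        ((a : Int), (b : Int), (c : Int)) = true then (1 : Int) else 0
    rw [if_neg (fun h => hm (hcb.mp h))]

-- the swapped-items dict comprehension gives A's parallel dict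
theorem pv_items_eq (arr : List (List String)) :
    (pvStA arr).1.items
      = ((pvIdx arr).items.foldl (fun d p => d.insert p.2 p.1)
          (PySem.Dict.empty : PySem.Dict Int String)).items := by
  obtain ⟨⟨hnd, hv⟩, h1, h2, h3⟩ := pv_pass1_main arr
  have hnodup : ((pvIdx arr).items.map (fun p => p.2)).Nodup := by
    have hval : (pvIdx arr).items.map (fun p => p.2) = (pvIdx arr).values := by
      simp only [PySem.Dict.values]
    rw [hval, hv]
    exact List.Nodup.map (by intro a b h; simpa using h) List.nodup_range
  rw [PySem.Dict.items_foldl_insert_fresh (pvIdx arr).items (fun p => p.2) (fun p => p.1)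
      PySem.Dict.empty (fun a _ => by simp [PySem.Dict.contains, PySem.Dict.empty]) hnodup]
  rw [h3]
  simp [PySem.Dict.items, PySem.Dict.empty]

-- ===== VERDICT (by name: the statement is the Claim_ definition above) =====
theorem routingMatrix_from_nodeBasePath_spec : Claim_equal_routingMatrix_from_nodeBasePath := by
  intro arr _
  show routingMatrix_from_nodeBasePath arr = routingMatrix_from_nodeBasePath_alt arr
  rw [pv_portA_eq, pv_portB_eq]
  obtain ⟨h1, h2, h3⟩ := (pv_pass1_main arr).2
  rw [h1, h2]
  exact Prod.ext (pv_matrix_eq arr) (pv_items_eq arr)
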